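-- pv_equiv track=rewrite | github.com/pm1100tm/Algorithm | programmers/skill_check_02.py | my_answer
-- ===== SOURCE A (Python) =====
-- def my_answer(scoville, K):
--     answer = 0
--     mixed_value = 0
--
--     if min(scoville) >= K:
--         return -1
--
--     array_scovile = sorted(scoville, reverse=True)
--
--     while mixed_value < K:
--         min_first = array_scovile.pop()
--         min_second = array_scovile.pop()
--
--         mixed_value = min_first + (min_second * 2)
--         answer += 1
--         if K <= mixed_value:
--             break
--
--         array_scovile.append(mixed_value)
--
--     return answer
-- ===== SOURCE B (Python) =====
-- def my_answer(scoville, K):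
--     # accumulator + index over the ascending sort; no list mutation (same IndexError edges as A's pops)
--     if min(scoville) >= K:
--         return -1
--     a = sorted(scoville)
--     if K <= 0:
--         return 0
--     mixed = a[0] + 2 * a[1]
--     answer = 1
--     idx = 2
--     while mixed < K:
--         mixed += 2 * a[idx]
--         idx += 1
--         answer += 1
--     return answer
-- ===== Notes on version B (the rewrite author's own statement) =====
-- stated objective: simpler
-- what changed: B drops A's list-as-stack (two pops + append of the mix every round) and instead walks the ascending sort once with a running accumulator and an index, mutating no list.
-- outside the precondition, e.g. on my_answer([1, 2], 10): A raises IndexError, B raises IndexError; on my_answer([], 5): A raises ValueError, B raises ValueError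
import Mathlib
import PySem

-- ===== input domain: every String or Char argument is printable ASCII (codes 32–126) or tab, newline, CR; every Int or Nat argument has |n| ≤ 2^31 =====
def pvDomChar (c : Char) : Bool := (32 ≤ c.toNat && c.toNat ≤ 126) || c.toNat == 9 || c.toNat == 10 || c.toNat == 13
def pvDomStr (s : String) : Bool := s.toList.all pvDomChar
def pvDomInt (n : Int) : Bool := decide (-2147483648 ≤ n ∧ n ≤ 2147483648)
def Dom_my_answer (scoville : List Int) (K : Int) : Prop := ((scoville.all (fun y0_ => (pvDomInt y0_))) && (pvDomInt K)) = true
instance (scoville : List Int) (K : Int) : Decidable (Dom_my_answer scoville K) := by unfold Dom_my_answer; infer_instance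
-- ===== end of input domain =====

-- B replaces A's list-as-stack (two pops + append each round) by a running accumulator and an index
-- over the ascending sort; objective: simpler (no list mutation), same exact results.


-- ===== PORT A =====
-- A's while loop: pop the two last elements of the descending array, mix, append the mix back.
-- A raises IndexError when a pop hits an empty list: there the port returns the current answer
-- (such inputs are excluded by Pre_my_answer).
def my_answer_loop (arr : List Int) (K : Int) (mixed answer : Int) : Int :=
  if mixed < K then
    match h1 : PySem.List.pop? arr with
    | none => answer
    | some (min_first, arr1) =>
      match h2 : PySem.List.pop? arr1 with
      | none => answer
      | some (min_second, arr2) =>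
        if K ≤ min_first + min_second * 2 then answer + 1
        else my_answer_loop (arr2 ++ [min_first + min_second * 2]) K
               (min_first + min_second * 2) (answer + 1)
  else answer
termination_by arr.length
decreasing_by
  have e1 : arr1.length + 1 = arr.length := by
    simpa using PySem.List.length_of_pop?_eq_some _ h1
  have e2 : arr2.length + 1 = arr1.length := by
    simpa using PySem.List.length_of_pop?_eq_some _ h2
  simp only [List.length_append, List.length_cons, List.length_nil]
  omega

def my_answer (scoville : List Int) (K : Int) : Int :=
  match PySem.List.min? scoville (fun x => x) with
  | none => 0          -- min([]) raises ValueError; excluded by Pre_my_answer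
  | some m =>
    if m ≥ K then -1
    else
      my_answer_loop (PySem.List.sorted scoville (fun x => x) true) K 0 0

-- ===== PORT B =====
-- while mixed < K: mixed += 2*a[idx]; idx += 1; answer += 1   (a[idx] out of range = IndexError,
-- the port returns the current answer there; excluded by Pre_my_answer)
def my_answer_alt_loop (a : List Int) (K : Int) (mixed answer : Int) (idx : Nat) : Int :=
  if mixed < K then
    match h : PySem.List.pyGet? a (idx : Int) with
    | none => answer
    | some x => my_answer_alt_loop a K (mixed + 2 * x) (answer + 1) (idx + 1)
  else answer
termination_by a.length - idx
decreasing_by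
  have hlt : (idx : Int) < a.length := by
    by_contra hc
    rw [(PySem.List.pyGet?_eq_none_iff _ _).mpr
      (by simp [PySem.Raise.InRange]; omega)] at h
    simp at h
  omega

def my_answer_alt (scoville : List Int) (K : Int) : Int :=
  match PySem.List.min? scoville (fun x => x) with
  | none => 0
  | some m =>
    if m ≥ K then -1
    else
      if K ≤ 0 then 0
      else
        match PySem.List.pyGet? (PySem.List.sorted scoville (fun x => x) false) 0,
              PySem.List.pyGet? (PySem.List.sorted scoville (fun x => x) false) 1 with
        | some x, some y =>
          my_answer_alt_loop (PySem.List.sorted scoville (fun x => x) false) K (x + 2 * y) 1 2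
        | _, _ => 0      -- a[1] raises IndexError (len < 2); excluded by Pre_my_answer

-- ===== PRECONDITION & SPEC =====
-- helper for Pre_: the mixed value after A has consumed the i+1 smallest elements
def pvMixAt (s : List Int) (i : Nat) : Int := s.headD 0 + 2 * ((s.take (i + 1)).drop 1).sum

-- Pre_ excludes exactly the inputs on which A raises: the empty list (min raises ValueError) and
-- the inputs where the loop exhausts the list before the mix reaches K (pop raises IndexError).
def Pre_my_answer (scoville : List Int) (K : Int) : Prop :=
  scoville ≠ [] ∧
    ((∀ x ∈ scoville, K ≤ x) ∨ K ≤ 0 ∨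
      ∃ i ∈ List.range scoville.length,
        1 ≤ i ∧ K ≤ pvMixAt (PySem.List.sorted scoville (fun x => x) false) i)
instance (scoville : List Int) (K : Int) : Decidable (Pre_my_answer scoville K) := by
  unfold Pre_my_answer; infer_instance

def pvWitness_my_answer : List Int × Int := ([1, 2], 3)

def Spec_my_answer (scoville : List Int) (K : Int) (out : Int) : Prop := out = my_answer_alt scoville K
instance (scoville : List Int) (K : Int) (out : Int) : Decidable (Spec_my_answer scoville K out) := by unfold Spec_my_answer; infer_instance

-- ===== CLAIM (what is proved, stated in full; the proofs are below) =====
def Claim_equal_my_answer : Prop := ∀ (scoville : List Int) (K : Int), Dom_my_answer scoville K → Pre_my_answer scoville K → Spec_my_answer scoville K (my_answer scoville K)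

-- ===== LEMMAS AND PROOFS =====

-- common abstract loop: consume the ascending remainder one element at a time
def mixLoop : List Int → Int → Int → Int → Int
  | [], _, _, answer => answer
  | x :: rs, K, mixed, answer =>
    if mixed < K then mixLoop rs K (mixed + 2 * x) (answer + 1) else answer

theorem mixLoop_stop (rest : List Int) (K mixed answer : Int) (h : ¬ mixed < K) :
    mixLoop rest K mixed answer = answer := by
  cases rest with
  | nil => rfl
  | cons x rs => simp [mixLoop, h]

theorem my_answer_loop_eq_mixLoop (rest : List Int) (K mixed answer : Int) :
    my_answer_loop (rest.reverse ++ [mixed]) K mixed answer = mixLoop rest K mixed answer := by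
  induction rest generalizing mixed answer with
  | nil =>
    unfold my_answer_loop
    by_cases h : mixed < K
    · rw [if_pos h]
      have h1 : PySem.List.pop? (([] : List Int).reverse ++ [mixed]) = some (mixed, []) := by
        simpa using PySem.List.pop?_last ([] : List Int) mixed
      rw [h1]; dsimp only
      rw [show PySem.List.pop? ([] : List Int) = none from by decide]; rfl
    · rw [if_neg h]; rfl
  | cons x rs ih =>
    unfold my_answer_loop; rw [mixLoop]
    by_cases h : mixed < K
    · rw [if_pos h, if_pos h]
      have h1 : PySem.List.pop? ((x :: rs).reverse ++ [mixed]) = some (mixed, (x :: rs).reverse) :=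
        PySem.List.pop?_last _ _
      have h2 : PySem.List.pop? ((x :: rs).reverse) = some (x, rs.reverse) := by
        simpa using PySem.List.pop?_last (rs.reverse) x
      rw [h1]; dsimp only
      rw [h2]; dsimp only
      by_cases hb : K ≤ mixed + x * 2
      · rw [if_pos hb, mixLoop_stop _ _ _ _ (by omega)]
      · rw [if_neg hb]
        have e : mixed + x * 2 = mixed + 2 * x := by ring
        rw [e, ih]
    · rw [if_neg h, if_neg h]

theorem my_answer_alt_loop_eq_mixLoop (a : List Int) (K mixed answer : Int) (idx : Nat)
    (rest : List Int) (hr : a.drop idx = rest) :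
    my_answer_alt_loop a K mixed answer idx = mixLoop rest K mixed answer := by
  induction rest generalizing mixed answer idx with
  | nil =>
    unfold my_answer_alt_loop; rw [mixLoop]
    by_cases h : mixed < K
    · rw [if_pos h]
      have hnone : PySem.List.pyGet? a (idx : Int) = none := by
        rw [PySem.List.pyGet?_natCast]
        apply List.getElem?_eq_none
        by_contra hc
        have := List.drop_eq_nil_iff.mp hr
        omega
      rw [hnone]
    · rw [if_neg h]
  | cons x rs ih =>
    unfold my_answer_alt_loop; rw [mixLoop]
    by_cases h : mixed < K
    · rw [if_pos h, if_pos h]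
      have hget : PySem.List.pyGet? a (idx : Int) = some x := by
        rw [PySem.List.pyGet?_natCast, ← List.head?_drop, hr]; rfl
      rw [hget]; dsimp only
      apply ih
      rw [← List.tail_drop, hr]; rfl
    · rw [if_neg h, if_neg h]

theorem sorted_rev_eq_reverse_sorted (xs : List Int) :
    PySem.List.sorted xs (fun x => x) true = (PySem.List.sorted xs (fun x => x) false).reverse := by
  apply List.Perm.eq_of_pairwise (le := fun a b : Int => b ≤ a)
  · intro a b _ _ h1 h2; omega
  · exact PySem.List.sorted_pairwise_rev xs _
  · rw [List.pairwise_reverse]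
    exact PySem.List.sorted_pairwise xs _
  · exact (PySem.List.sorted_perm xs _ _).trans
      ((List.reverse_perm _).trans (PySem.List.sorted_perm xs _ _)).symm

-- ===== VERDICT (by name: the statement is the Claim_ definition above) =====
theorem my_answer_spec : Claim_equal_my_answer := by
  intro scoville K _ _
  unfold Spec_my_answer my_answer my_answer_alt
  cases hm : PySem.List.min? scoville (fun x => x) with
  | none => rfl
  | some m =>
    dsimp only
    by_cases hKm : m ≥ K
    · rw [if_pos hKm, if_pos hKm]
    · rw [if_neg hKm, if_neg hKm, sorted_rev_eq_reverse_sorted]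
      by_cases hK : K ≤ 0
      · rw [if_pos hK, my_answer_loop.eq_def, if_neg (by omega : ¬ (0:Int) < K)]
      · rw [if_neg hK]
        cases hs : PySem.List.sorted scoville (fun x => x) false with
        | nil =>
          unfold my_answer_loop; rw [if_pos (by omega : (0:Int) < K)]
          have : PySem.List.pop? (([] : List Int).reverse ++ []) = none := by decide
          simp only [List.reverse_nil]
          rw [show PySem.List.pop? ([] : List Int) = none from by decide]
          rw [show PySem.List.pyGet? ([] : List Int) (0:Int) = none from by decide]
        | cons x t =>
          cases t with
          | nil =>
            unfold my_answer_loop; rw [if_pos (by omega : (0:Int) < K)]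
            have h1 : PySem.List.pop? ([x].reverse) = some (x, ([] : List Int)) := by
              simpa using PySem.List.pop?_last ([] : List Int) x

            rw [List.reverse_cons, List.reverse_nil, List.nil_append] at h1 ⊢
            rw [h1]; dsimp only
            rw [show PySem.List.pop? ([] : List Int) = none from by decide]
            rw [PySem.List.pyGet?_zero_cons]
            rw [show PySem.List.pyGet? [x] (1:Int) = none from by
              rw [(PySem.List.pyGet?_eq_none_iff _ _)]
              simp [PySem.Raise.InRange]]
          | cons y rs =>
            unfold my_answer_loop; rw [if_pos (by omega : (0:Int) < K)]
            have h1 : PySem.List.pop? ((x :: y :: rs).reverse) = some (x, (y :: rs).reverse) := by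
              simpa using PySem.List.pop?_last ((y :: rs).reverse) x
            have h2 : PySem.List.pop? ((y :: rs).reverse) = some (y, rs.reverse) := by
              simpa using PySem.List.pop?_last (rs.reverse) y
            rw [h1]; dsimp only
            rw [h2]; dsimp only
            rw [PySem.List.pyGet?_zero_cons]
            rw [show PySem.List.pyGet? (x :: y :: rs) (1:Int) = some y from by
              have := PySem.List.pyGet?_cons_succ x (y :: rs) 0
              simpa [PySem.List.pyGet?_zero_cons] using this]
            dsimp only
            rw [my_answer_alt_loop_eq_mixLoop (x :: y :: rs) K (x + 2*y) 1 2 rs rfl]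
            by_cases hb : K ≤ x + y * 2
            · rw [if_pos hb, mixLoop_stop _ _ _ _ (by omega)]; norm_num
            · rw [if_neg hb, my_answer_loop_eq_mixLoop rs K (x + y * 2) (0 + 1)]
              have e : x + y * 2 = x + 2 * y := by ring
              have e2 : (0 : Int) + 1 = 1 := by norm_num
              rw [e, e2]
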